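-- pv_equiv track=rewrite | github.com/makoeppel/musip | tb_int/scripts/generate_opq_twoframe_report.py | build_bit_row
-- ===== SOURCE A (Python) =====
-- from typing import Any
--
-- def build_bit_row(name: str, axis: list[Any], active_cycles: set[int]) -> dict[str, Any]:
--     wave = []
--     prev = None
--     for item in axis:
--         val = "0"
--         if not isinstance(item, dict) and item in active_cycles:
--             val = "1"
--         if val == prev:
--             wave.append(".")
--         else:
--             wave.append(val)
--         prev = val
--     return {"name": name, "wave": "".join(wave)}
-- ===== SOURCE B (Python) =====
-- def build_bit_row(name, axis, active_cycles):
--     # Phase 1: classify each axis item into a bit.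
--     bits = ["1" if (not isinstance(item, dict) and item in active_cycles) else "0"
--             for item in axis]
--     # Phase 2: run-length collapse: first bit of each run verbatim, rest as '.'.
--     pieces = []
--     i = 0
--     n = len(bits)
--     while i < n:
--         j = i
--         while j < n and bits[j] == bits[i]:
--             j += 1
--         pieces.append(bits[i] + "." * (j - i - 1))
--         i = j
--     return {"name": name, "wave": "".join(pieces)}
-- ===== Notes on version B (the rewrite author's own statement) =====
-- stated objective: alternative
-- what changed: B separates classification from run-length collapsing: it first maps the axis to a list of '0'/'1' bits, then compresses each maximal run into its key followed by dots, instead of A's interleaved single pass that tracks the previous value per element.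
import Mathlib
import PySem

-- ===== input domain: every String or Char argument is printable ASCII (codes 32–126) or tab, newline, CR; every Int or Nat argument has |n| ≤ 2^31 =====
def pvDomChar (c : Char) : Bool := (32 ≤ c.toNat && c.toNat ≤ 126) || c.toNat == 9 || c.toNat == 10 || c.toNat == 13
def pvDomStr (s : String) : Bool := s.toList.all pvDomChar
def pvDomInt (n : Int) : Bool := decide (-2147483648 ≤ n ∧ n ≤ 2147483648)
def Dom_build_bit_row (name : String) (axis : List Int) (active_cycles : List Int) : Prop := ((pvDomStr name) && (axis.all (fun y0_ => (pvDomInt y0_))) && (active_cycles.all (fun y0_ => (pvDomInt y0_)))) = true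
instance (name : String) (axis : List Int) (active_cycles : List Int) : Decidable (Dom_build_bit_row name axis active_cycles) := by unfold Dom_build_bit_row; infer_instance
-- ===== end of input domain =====

-- B separates classifying the axis items into '0'/'1' bits from run-length collapsing the
-- bit list (alternative decomposition); A interleaves both in one pass tracking the previous value.

-- ===== PORT A =====
-- Literal port of A's single loop: state = (wave accumulator, prev).
-- isinstance(item, dict) is always False here: axis items are ints under the type convention.
def build_bit_row (name : String) (axis : List Int) (active_cycles : List Int) : List (String × String) :=
  let r := axis.foldl
    (fun (st : List String × Option String) (item : Int) =>
      let val : String := if active_cycles.contains item then "1" else "0"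
      if st.2 = some val then (st.1 ++ ["."], some val)
      else (st.1 ++ [val], some val))
    ([], none)
  [("name", name), ("wave", PySem.Str.join "" r.1)]

-- ===== PORT B =====
-- Run-length collapse of the bit list: first bit of each run verbatim, rest as '.'.
-- '.' * (run_length - 1) is ported by hand as String.ofList (List.replicate … '.'), exact since
-- the count (the length of the rest of the run, found by takeWhile) is a nonnegative Nat.
def bbrRle : List String → List String
  | [] => []
  | x :: xs =>
    (x ++ String.ofList (List.replicate (xs.takeWhile (· == x)).length '.'))
      :: bbrRle (xs.dropWhile (· == x))
termination_by l => l.length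
decreasing_by
  simpa using Nat.lt_succ_of_le (List.length_dropWhile_le _ xs)

def build_bit_row_alt (name : String) (axis : List Int) (active_cycles : List Int) : List (String × String) :=
  let bits := axis.map (fun item => if active_cycles.contains item then "1" else "0")
  [("name", name), ("wave", PySem.Str.join "" (bbrRle bits))]

-- ===== PRECONDITION & SPEC =====
def Spec_build_bit_row (name : String) (axis : List Int) (active_cycles : List Int) (out : List (String × String)) : Prop := out = build_bit_row_alt name axis active_cycles
instance (name : String) (axis : List Int) (active_cycles : List Int) (out : List (String × String)) : Decidable (Spec_build_bit_row name axis active_cycles out) := by unfold Spec_build_bit_row; infer_instance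

-- ===== CLAIM (what is proved, stated in full; the proofs are below) =====
def Claim_equal_build_bit_row : Prop := ∀ (name : String) (axis : List Int) (active_cycles : List Int), Dom_build_bit_row name axis active_cycles → Spec_build_bit_row name axis active_cycles (build_bit_row name axis active_cycles)

-- ===== LEMMAS AND PROOFS =====

-- Per-element view of A's loop body: the emitted symbol for each bit given the previous bit.
def bbrExpand : Option String → List String → List String
  | _, [] => []
  | p, b :: bs => (if p = some b then "." else b) :: bbrExpand (some b) bs

theorem bbr_step_eq (ac : List Int) :
    (fun (st : List String × Option String) (item : Int) =>
      let val : String := if ac.contains item then "1" else "0"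
      if st.2 = some val then (st.1 ++ ["."], some val)
      else (st.1 ++ [val], some val))
    = (fun (st : List String × Option String) (item : Int) =>
        (st.1 ++ [if st.2 = some (if ac.contains item then "1" else "0") then "."
                  else (if ac.contains item then "1" else "0")],
         some (if ac.contains item then "1" else "0"))) := by
  funext st item
  dsimp only
  split_ifs with h <;> simp

theorem bbr_foldA (f : Int → String) :
    ∀ (axis : List Int) (acc : List String) (p : Option String),
      (axis.foldl
        (fun (st : List String × Option String) (item : Int) =>
          (st.1 ++ [if st.2 = some (f item) then "." else f item], some (f item)))
        (acc, p)).1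
      = acc ++ bbrExpand p (axis.map f) := by
  intro axis
  induction axis with
  | nil => intro acc p; simp [bbrExpand]
  | cons a rest ih =>
    intro acc p
    simp [List.foldl_cons, bbrExpand, ih]

theorem bbrExpand_run (x : String) :
    ∀ (xs : List String),
      bbrExpand (some x) xs
        = List.replicate (xs.takeWhile (· == x)).length "."
            ++ bbrExpand none (xs.dropWhile (· == x)) := by
  intro xs
  induction xs with
  | nil => simp [bbrExpand]
  | cons b bs ih =>
    by_cases hb : b = x
    · subst hb
      simp [bbrExpand, List.takeWhile, List.dropWhile, List.replicate_succ, ih]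
    · have hbx : (b == x) = false := by simp [hb]
      simp [bbrExpand, List.takeWhile, List.dropWhile, hbx, Ne.symm hb]

theorem bbr_join_empty : ∀ (l : List (List Char)), PySem.Chars.join [] l = l.flatten := by
  intro l
  induction l with
  | nil => simp [PySem.Chars.join_nil]
  | cons p rest ih =>
    cases rest with
    | nil => simp [PySem.Chars.join_singleton]
    | cons q r => simp [PySem.Chars.join_cons_cons]; simpa [PySem.Chars.join_cons_cons] using ih

theorem bbrRle_flatten :
    ∀ (bits : List String),
      ((bbrRle bits).map String.toList).flatten
        = ((bbrExpand none bits).map String.toList).flatten := by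
  intro bits
  induction bits using bbrRle.induct with
  | case1 => simp [bbrRle, bbrExpand]
  | case2 x xs ih =>
    rw [bbrRle, bbrExpand]
    simp only [List.map_cons, List.flatten_cons, bbrExpand_run, List.map_append, List.flatten_append]
    simp [ih]

-- ===== VERDICT (by name: the statement is the Claim_ definition above) =====
theorem build_bit_row_spec : Claim_equal_build_bit_row := by
  intro name axis active_cycles _
  unfold Spec_build_bit_row build_bit_row build_bit_row_alt
  have hw :
      PySem.Str.join ""
        (axis.foldl
          (fun (st : List String × Option String) (item : Int) =>
            let val : String := if active_cycles.contains item then "1" else "0"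
            if st.2 = some val then (st.1 ++ ["."], some val)
            else (st.1 ++ [val], some val))
          ([], none)).1
      = PySem.Str.join ""
          (bbrRle (axis.map (fun item => if active_cycles.contains item then "1" else "0"))) := by
    rw [bbr_step_eq, bbr_foldA]
    apply String.ext
    rw [PySem.Str.toList_join, PySem.Str.toList_join]
    simp only [String.toList_empty]
    rw [bbr_join_empty, bbr_join_empty, bbrRle_flatten]
    simp
  simp only [hw]
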